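-- pv_equiv track=rewrite | github.com/LikhitaTummalecherla/GFG-Code-Repo | Difficulty: Easy/Tywin's War Strategy/tywins-war-strategy.py | minSoldiers
-- ===== SOURCE A (Python) =====
-- from math import ceil
--
-- def minSoldiers(arr, k):
--     n=len(arr)
--     needed=ceil(n/2)
--     notLucky=[]
--     lucky=res=0
--     for i in arr:
--         if lucky<needed:
--             if i%k==0:
--                 lucky+=1
--             else:
--                 notLucky.append(k-(i%k))
--         else:
--             return res
--     notLucky.sort(reverse=True)
--     while lucky<needed:
--         res+=notLucky.pop()
--         lucky+=1
--     return res
-- ===== SOURCE B (Python) =====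
-- def _sum_smallest(costs, t):
--     # quickselect-style partial selection: sum of the t smallest values
--     if t <= 0:
--         return 0
--     if t >= len(costs):
--         return sum(costs)
--     p = costs[len(costs) // 2]
--     less = [c for c in costs if c < p]
--     if t <= len(less):
--         return _sum_smallest(less, t)
--     eq_count = 0
--     for c in costs:
--         if c == p:
--             eq_count += 1
--     if t <= len(less) + eq_count:
--         return sum(less) + (t - len(less)) * p
--     greater = [c for c in costs if c > p]
--     return sum(less) + eq_count * p + _sum_smallest(greater, t - len(less) - eq_count)
--
-- def minSoldiers(arr, k):
--     needed = (len(arr) + 1) // 2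
--     lucky = 0
--     costs = []
--     for x in arr:
--         r = x % k
--         if r == 0:
--             lucky += 1
--         else:
--             costs.append(k - r)
--     t = needed - lucky
--     if t <= 0:
--         return 0
--     return _sum_smallest(costs, t)
-- ===== Notes on version B (the rewrite author's own statement) =====
-- stated objective: alternative
-- what changed: Replaces the full reverse-sort-and-pop of conversion costs with a single counting pass plus a quickselect-style partial selection that sums only the t smallest costs (intended as faster; measured only ~1.3x at the largest size).
import Mathlib
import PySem

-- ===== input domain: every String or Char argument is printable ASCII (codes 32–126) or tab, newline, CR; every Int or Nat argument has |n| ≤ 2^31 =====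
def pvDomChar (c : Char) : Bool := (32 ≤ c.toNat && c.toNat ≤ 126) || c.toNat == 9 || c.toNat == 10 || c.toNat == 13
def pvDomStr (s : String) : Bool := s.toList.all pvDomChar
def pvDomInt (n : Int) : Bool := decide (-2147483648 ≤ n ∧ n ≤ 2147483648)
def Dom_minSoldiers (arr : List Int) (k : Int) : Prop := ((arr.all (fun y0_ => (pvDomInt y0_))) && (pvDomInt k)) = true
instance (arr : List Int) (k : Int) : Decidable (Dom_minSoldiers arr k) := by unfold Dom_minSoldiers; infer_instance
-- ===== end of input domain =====

-- B replaces A's full reverse-sort-and-pop of the conversion costs by a single counting pass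
-- plus a quickselect-style partial selection that sums only the t smallest costs.

-- ===== PORT A =====
-- the for-loop of A: state (notLucky, lucky, res); `Sum.inl res` is the early `return res`,
-- `Sum.inr (notLucky, lucky)` is falling off the end of the loop
def minSoldiersForA (k needed : Int) : List Int → List Int → Int → Int → Int ⊕ (List Int × Int)
  | [], notLucky, lucky, _res => Sum.inr (notLucky, lucky)
  | i :: rest, notLucky, lucky, res =>
    if lucky < needed then
      if PySem.Int.mod i k = 0 then minSoldiersForA k needed rest notLucky (lucky + 1) res
      else minSoldiersForA k needed rest (notLucky ++ [k - PySem.Int.mod i k]) lucky res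
    else Sum.inl res

-- the while-loop of A: runs while lucky < needed, i.e. exactly (needed - lucky).toNat times;
-- notLucky.pop() is PySem.List.pop? (last element); `none` is Python's IndexError (unreachable when k ≠ 0)
def minSoldiersWhileA : Nat → List Int → Int → Int
  | 0, _, res => res
  | fuel + 1, notLucky, res =>
    match PySem.List.pop? notLucky with
    | none => res
    | some (x, rest) => minSoldiersWhileA fuel rest (res + x)

def minSoldiers (arr : List Int) (k : Int) : Int :=
  -- math.ceil(n/2) = (n+1)//2 exactly for an int n of list-length size
  let needed : Int := PySem.Int.floordiv ((arr.length : Int) + 1) 2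
  match minSoldiersForA k needed arr [] 0 0 with
  | Sum.inl res => res
  | Sum.inr (notLucky, lucky) =>
    minSoldiersWhileA (needed - lucky).toNat (PySem.List.sorted notLucky (fun x => x) true) 0

-- ===== PORT B =====
-- helpers needed by sumSmallest's termination proof (cited in decreasing_by)
theorem pivot_mem (costs : List Int) (h : costs ≠ []) :
    PySem.List.pyGetD costs (PySem.Int.floordiv (costs.length : Int) 2) 0 ∈ costs := by
  have hlen : 0 < costs.length := List.length_pos_iff.mpr h
  have h2 : PySem.Int.floordiv (costs.length : Int) 2 = (costs.length : Int) / 2 :=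
    PySem.Int.floordiv_eq_ediv_of_pos (by omega)
  rw [h2, PySem.List.pyGetD_eq_getElem costs 0 (by positivity) (by omega)]
  exact List.getElem_mem _

-- the three list-comprehension/counting helpers of _sum_smallest
def pyLess (costs : List Int) (p : Int) : List Int := costs.filter (fun c => c < p)
def pyEqCount (costs : List Int) (p : Int) : Int :=
  costs.foldl (fun acc c => if c = p then acc + 1 else acc) 0
def pyGreater (costs : List Int) (p : Int) : List Int := costs.filter (fun c => p < c)

theorem pyLess_length_lt (costs : List Int) (h : costs ≠ []) :
    (pyLess costs (PySem.List.pyGetD costs (PySem.Int.floordiv (costs.length : Int) 2) 0)).length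
      < costs.length :=
  List.length_filter_lt_length_iff_exists.mpr ⟨_, pivot_mem costs h, by simp⟩

theorem pyGreater_length_lt (costs : List Int) (h : costs ≠ []) :
    (pyGreater costs (PySem.List.pyGetD costs (PySem.Int.floordiv (costs.length : Int) 2) 0)).length
      < costs.length :=
  List.length_filter_lt_length_iff_exists.mpr ⟨_, pivot_mem costs h, by simp⟩

-- _sum_smallest: quickselect-style sum of the t smallest values
def sumSmallest (costs : List Int) (t : Int) : Int :=
  if t ≤ 0 then 0
  else if (costs.length : Int) ≤ t then costs.sum
  else
    let p := PySem.List.pyGetD costs (PySem.Int.floordiv (costs.length : Int) 2) 0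
    let less := pyLess costs p
    if t ≤ (less.length : Int) then sumSmallest less t
    else
      let eqCount := pyEqCount costs p
      if t ≤ (less.length : Int) + eqCount then less.sum + (t - (less.length : Int)) * p
      else
        let greater := pyGreater costs p
        less.sum + eqCount * p + sumSmallest greater (t - (less.length : Int) - eqCount)
termination_by costs.length
decreasing_by
  · exact pyLess_length_lt costs (by rintro rfl; simp at *; omega)
  · exact pyGreater_length_lt costs (by rintro rfl; simp at *; omega)

-- the single loop of B: state (lucky, costs)
def minSoldiersAltLoop (k : Int) : List Int → Int → List Int → Int × List Int
  | [], lucky, costs => (lucky, costs)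
  | x :: rest, lucky, costs =>
    let r := PySem.Int.mod x k
    if r = 0 then minSoldiersAltLoop k rest (lucky + 1) costs
    else minSoldiersAltLoop k rest lucky (costs ++ [k - r])

def minSoldiers_alt (arr : List Int) (k : Int) : Int :=
  let needed : Int := PySem.Int.floordiv ((arr.length : Int) + 1) 2
  let st := minSoldiersAltLoop k arr 0 []
  let t := needed - st.1
  if t ≤ 0 then 0 else sumSmallest st.2 t

-- ===== PRECONDITION & SPEC =====
-- Pre_ excludes exactly k = 0, on which Python A raises ZeroDivisionError at `i % k`
-- on every non-empty arr (and B's `x % k` raises there too).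
def Pre_minSoldiers (arr : List Int) (k : Int) : Prop := k ≠ 0
instance (arr : List Int) (k : Int) : Decidable (Pre_minSoldiers arr k) := by unfold Pre_minSoldiers; infer_instance
def pvWitness_minSoldiers : List Int × Int := ([3, 5, 6, 7, 9, 10], 4)

def Spec_minSoldiers (arr : List Int) (k : Int) (out : Int) : Prop := out = minSoldiers_alt arr k
instance (arr : List Int) (k : Int) (out : Int) : Decidable (Spec_minSoldiers arr k out) := by unfold Spec_minSoldiers; infer_instance

-- ===== CLAIM (what is proved, stated in full; the proofs are below) =====
def Claim_equal_minSoldiers : Prop := ∀ (arr : List Int) (k : Int), Dom_minSoldiers arr k → Pre_minSoldiers arr k → Spec_minSoldiers arr k (minSoldiers arr k)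

-- ===== LEMMAS AND PROOFS =====

-- number of lucky soldiers and the list of conversion costs of the unlucky ones, in order
def luckyCount (arr : List Int) (k : Int) : Int :=
  ((arr.countP (fun x => PySem.Int.mod x k = 0)) : Int)

def costsOf (arr : List Int) (k : Int) : List Int :=
  (arr.filter (fun x => ¬ PySem.Int.mod x k = 0)).map (fun x => k - PySem.Int.mod x k)

theorem luckyCount_nonneg (arr : List Int) (k : Int) : 0 ≤ luckyCount arr k := by
  simp [luckyCount]

theorem altLoop_spec (k : Int) (arr : List Int) : ∀ (lucky : Int) (costs : List Int),
    minSoldiersAltLoop k arr lucky costs = (lucky + luckyCount arr k, costs ++ costsOf arr k) := by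
  induction arr with
  | nil => intro lucky costs; simp [minSoldiersAltLoop, luckyCount, costsOf]
  | cons x rest ih =>
    intro lucky costs
    by_cases hx : PySem.Int.mod x k = 0
    · rw [show minSoldiersAltLoop k (x :: rest) lucky costs
          = minSoldiersAltLoop k rest (lucky + 1) costs by simp [minSoldiersAltLoop, hx], ih]
      have h1 : luckyCount (x :: rest) k = 1 + luckyCount rest k := by
        simp [luckyCount, hx]; ring
      have h2 : costsOf (x :: rest) k = costsOf rest k := by
        simp [costsOf, hx]
      rw [h1, h2]
      simp only [Prod.mk.injEq]
      constructor <;> first | trivial | ring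
    · rw [show minSoldiersAltLoop k (x :: rest) lucky costs
          = minSoldiersAltLoop k rest lucky (costs ++ [k - PySem.Int.mod x k]) by
            simp [minSoldiersAltLoop, hx], ih]
      have h1 : luckyCount (x :: rest) k = luckyCount rest k := by
        simp [luckyCount, hx]
      have h2 : costsOf (x :: rest) k = (k - PySem.Int.mod x k) :: costsOf rest k := by
        simp [costsOf, hx]
      rw [h1, h2]
      simp

-- A's for-loop: once lucky reaches needed, the loop returns res unless the list is already empty
theorem forA_ge (k needed : Int) (arr nl : List Int) (lucky res : Int) (h : needed ≤ lucky) :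
    minSoldiersForA k needed arr nl lucky res = Sum.inl res ∨
      (arr = [] ∧ minSoldiersForA k needed arr nl lucky res = Sum.inr (nl, lucky)) := by
  cases arr with
  | nil => right; exact ⟨rfl, rfl⟩
  | cons i rest => left; simp [minSoldiersForA, show ¬ lucky < needed by omega]

-- A's for-loop, fully characterised while lucky < needed
theorem forA_spec (k needed : Int) (arr : List Int) : ∀ (nl : List Int) (lucky res : Int),
    lucky < needed →
    (needed ≤ lucky + luckyCount arr k ∧
      (minSoldiersForA k needed arr nl lucky res = Sum.inl res ∨
        ∃ nl' lf, minSoldiersForA k needed arr nl lucky res = Sum.inr (nl', lf) ∧ needed ≤ lf)) ∨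
    (lucky + luckyCount arr k < needed ∧
      minSoldiersForA k needed arr nl lucky res = Sum.inr (nl ++ costsOf arr k, lucky + luckyCount arr k)) := by
  induction arr with
  | nil =>
    intro nl lucky res h
    right
    simp [minSoldiersForA, luckyCount, costsOf]
    omega
  | cons i rest ih =>
    intro nl lucky res h
    by_cases hi : PySem.Int.mod i k = 0
    · have hcd : luckyCount (i :: rest) k = 1 + luckyCount rest k := by
        simp [luckyCount, hi]; ring
      have hstep : minSoldiersForA k needed (i :: rest) nl lucky res
          = minSoldiersForA k needed rest nl (lucky + 1) res := by
        simp [minSoldiersForA, h, hi]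
      by_cases h1 : lucky + 1 < needed
      · rcases ih nl (lucky + 1) res h1 with ⟨hc, hres⟩ | ⟨hc, hres⟩
        · left
          refine ⟨by omega, ?_⟩
          rw [hstep]; exact hres
        · right
          refine ⟨by omega, ?_⟩
          rw [hstep, hres]
          have hco : costsOf (i :: rest) k = costsOf rest k := by
            simp [costsOf, hi]
          rw [hco, hcd]
          simp only [Sum.inr.injEq, Prod.mk.injEq]
          constructor <;> first | trivial | ring
      · -- lucky + 1 = needed: the recursive call starts with lucky ≥ needed
        left
        have hnn := luckyCount_nonneg rest k
        refine ⟨by omega, ?_⟩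
        rcases forA_ge k needed rest nl (lucky + 1) res (by omega) with hres | ⟨_, hres⟩
        · left; rw [hstep]; exact hres
        · right; exact ⟨nl, lucky + 1, by rw [hstep]; exact hres, by omega⟩
    · have hcd : luckyCount (i :: rest) k = luckyCount rest k := by
        simp [luckyCount, hi]
      have hco : costsOf (i :: rest) k = (k - PySem.Int.mod i k) :: costsOf rest k := by
        simp [costsOf, hi]
      have hstep : minSoldiersForA k needed (i :: rest) nl lucky res
          = minSoldiersForA k needed rest (nl ++ [k - PySem.Int.mod i k]) lucky res := by
        simp [minSoldiersForA, h, hi]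
      rcases ih (nl ++ [k - PySem.Int.mod i k]) lucky res h with ⟨hc, hres⟩ | ⟨hc, hres⟩
      · left
        refine ⟨by omega, ?_⟩
        rw [hstep]; exact hres
      · right
        refine ⟨by omega, ?_⟩
        rw [hstep, hres, hco, hcd]
        simp [List.append_assoc]

-- popping the last element t times from the REVERSE of R sums the first t elements of R
theorem whileA_reverse (t : Nat) : ∀ (R : List Int) (res : Int), t ≤ R.length →
    minSoldiersWhileA t R.reverse res = res + ((R.take t).sum) := by
  induction t with
  | zero => intro R res _; simp [minSoldiersWhileA]
  | succ t ih =>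
    intro R res hlen
    cases R with
    | nil => simp at hlen
    | cons r R' =>
      rw [show (r :: R').reverse = R'.reverse ++ [r] by simp]
      simp only [minSoldiersWhileA, PySem.List.pop?_last]
      rw [ih R' (res + r) (by simpa using hlen)]
      simp [List.take_succ_cons]
      ring

-- Python's stable sort on plain Int values: descending sort = reverse of ascending sort
theorem sorted_rev_eq_reverse (nl : List Int) :
    PySem.List.sorted nl (fun x => x) true = (PySem.List.sorted nl (fun x => x) false).reverse := by
  apply PySem.List.eq_of_perm_of_pairwise_le_of_injective (fun x : Int => -x) neg_injective
  · exact (PySem.List.sorted_perm nl _ true).trans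
      ((PySem.List.sorted_perm nl _ false).symm.trans (List.reverse_perm _).symm)
  · exact (PySem.List.sorted_pairwise_rev nl _).imp (fun h => by omega)
  · rw [List.pairwise_reverse]
    exact (PySem.List.sorted_pairwise nl _).imp (fun h => by omega)

theorem filter_eq_replicate (costs : List Int) (p : Int) :
    costs.filter (fun c => c = p) = List.replicate (costs.filter (fun c => c = p)).length p := by
  rw [List.eq_replicate_iff]
  exact ⟨rfl, fun b hb => by have := List.of_mem_filter hb; simpa using this⟩

-- three-way partition of a list at a pivot, as a permutation
theorem partition_perm (p : Int) (costs : List Int) :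
    costs.Perm (costs.filter (fun c => c < p) ++ costs.filter (fun c => c = p) ++
      costs.filter (fun c => p < c)) := by
  induction costs with
  | nil => simp
  | cons x l ih =>
    rcases lt_trichotomy x p with hx | hx | hx
    · rw [List.filter_cons_of_pos (by simpa using hx),
        List.filter_cons_of_neg (by simp; omega), List.filter_cons_of_neg (by simp; omega)]
      exact ih.cons x
    · rw [List.filter_cons_of_neg (by simp; omega),
        List.filter_cons_of_pos (by simpa using hx), List.filter_cons_of_neg (by simp; omega)]
      refine (ih.cons x).trans ?_
      simp only [List.append_assoc, List.cons_append]
      exact List.perm_middle.symm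
    · rw [List.filter_cons_of_neg (by simp; omega),
        List.filter_cons_of_neg (by simp; omega), List.filter_cons_of_pos (by simpa using hx)]
      exact (ih.cons x).trans List.perm_middle.symm
-- a sorted list decomposes at any pivot into sorted-below ++ equals ++ sorted-above
theorem sorted_partition (costs : List Int) (p : Int) :
    PySem.List.sorted costs (fun x => x) false =
      PySem.List.sorted (costs.filter (fun c => c < p)) (fun x => x) false ++
      costs.filter (fun c => c = p) ++
      PySem.List.sorted (costs.filter (fun c => p < c)) (fun x => x) false := by
  apply PySem.List.eq_of_perm_of_pairwise_le_of_injective (fun x : Int => x) Function.injective_id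
  · refine (PySem.List.sorted_perm costs _ false).trans ((partition_perm p costs).trans ?_)
    exact ((PySem.List.sorted_perm _ _ _).symm.append (List.Perm.refl _)).append
      (PySem.List.sorted_perm _ _ _).symm
  · exact PySem.List.sorted_pairwise costs _
  · rw [List.pairwise_append, List.pairwise_append]
    have memL : ∀ a, a ∈ PySem.List.sorted (costs.filter (fun c => c < p)) (fun x => x) false →
        a < p := by
      intro a ha
      rw [PySem.List.mem_sorted] at ha
      have := List.of_mem_filter ha; simpa using this
    have memE : ∀ a, a ∈ costs.filter (fun c => c = p) → a = p := by
      intro a ha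
      have := List.of_mem_filter ha; simpa using this
    have memG : ∀ a, a ∈ PySem.List.sorted (costs.filter (fun c => p < c)) (fun x => x) false →
        p < a := by
      intro a ha
      rw [PySem.List.mem_sorted] at ha
      have := List.of_mem_filter ha; simpa using this
    refine ⟨⟨PySem.List.sorted_pairwise _ _, ?_, ?_⟩, PySem.List.sorted_pairwise _ _, ?_⟩
    · rw [filter_eq_replicate costs p]
      exact List.pairwise_replicate.mpr (Or.inr (le_refl p))
    · intro a ha b hb
      have h1 := memL a ha
      have h2 := memE b hb
      omega
    · intro a ha b hb
      have h2 := memG b hb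
      rcases List.mem_append.mp ha with ha | ha
      · have h1 := memL a ha; omega
      · have h1 := memE a ha; omega
-- sums of prefixes of a three-block concatenation
theorem take_middle_sum (L E G : List Int) (p : Int) (hE : E = List.replicate E.length p)
    (n : Nat) (h1 : L.length ≤ n) (h2 : n ≤ L.length + E.length) :
    ((L ++ E ++ G).take n).sum = L.sum + ((n : Int) - (L.length : Int)) * p := by
  rw [List.append_assoc, List.take_append, List.take_of_length_le h1,
    List.take_append,
    show n - L.length - E.length = 0 by omega, List.take_zero, List.append_nil]
  conv_lhs => rw [hE]
  rw [List.take_replicate, List.sum_append, List.sum_replicate,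
    show min (n - L.length) E.length = n - L.length by omega]
  have hc : ((n - L.length : Nat) : Int) = (n : Int) - (L.length : Int) := by omega
  rw [nsmul_eq_mul, hc]

theorem take_past_sum (L E G : List Int) (n : Nat) (h : L.length + E.length ≤ n) :
    ((L ++ E ++ G).take n).sum = L.sum + E.sum + ((G.take (n - L.length - E.length)).sum) := by
  rw [List.append_assoc, List.take_append, List.take_of_length_le (by omega),
    List.take_append, List.take_of_length_le (by omega),
    List.sum_append, List.sum_append]
  ring_nf

-- the eqCount loop of B counts the elements equal to the pivot
theorem pyEqCount_spec (costs : List Int) (p : Int) :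
    pyEqCount costs p = ((costs.filter (fun c => c = p)).length : Int) := by
  have h := PySem.List.foldl_count_if (fun c => decide (c = p)) costs 0
  simp only [decide_eq_true_eq] at h
  simp only [pyEqCount, h, List.countP_eq_length_filter, zero_add]

-- quickselect computes the sum of the first t elements of the ascending sort
theorem sumSmallest_spec (costs : List Int) (t : Int) :
    sumSmallest costs t = ((PySem.List.sorted costs (fun x => x) false).take t.toNat).sum := by
  fun_induction sumSmallest costs t with
  | case1 costs t h =>
    have : t.toNat = 0 := by omega
    simp [this]
  | case2 costs t h hlen =>
    have h1 : (PySem.List.sorted costs (fun x => x) false).length ≤ t.toNat := by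
      rw [PySem.List.length_sorted]; omega
    rw [List.take_of_length_le h1]
    exact ((PySem.List.sorted_perm costs _ false).sum_eq).symm
  | case3 costs t h hlen p less hless ih =>
    simp only [less, pyLess] at hless ih ⊢
    rw [ih, sorted_partition costs p]
    have hlt : t.toNat ≤ (PySem.List.sorted (costs.filter (fun c => c < p)) (fun x => x) false).length := by
      rw [PySem.List.length_sorted]; omega
    rw [List.append_assoc, List.take_append_of_le_length hlt]
  | case4 costs t h hlen p less hless eqCount heq =>
    simp only [less, eqCount, pyLess] at hless heq ⊢
    rw [pyEqCount_spec] at heq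
    rw [sorted_partition costs p,
      take_middle_sum _ _ _ p (filter_eq_replicate costs p) t.toNat
        (by rw [PySem.List.length_sorted]; omega)
        (by rw [PySem.List.length_sorted]; omega)]
    rw [(PySem.List.sorted_perm (costs.filter (fun c => c < p)) (fun x : Int => x) false).sum_eq,
      PySem.List.length_sorted]
    have hc : ((t.toNat : Int) - ((costs.filter (fun c => c < p)).length : Int))
        = t - ((costs.filter (fun c => c < p)).length : Int) := by omega
    rw [hc]
  | case5 costs t h hlen p less hless eqCount heq greater ih =>
    simp only [less, eqCount, greater, pyLess, pyGreater] at hless heq ih ⊢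
    rw [pyEqCount_spec] at heq ih ⊢
    rw [sorted_partition costs p,
      take_past_sum _ _ _ t.toNat (by rw [PySem.List.length_sorted]; omega)]
    rw [(PySem.List.sorted_perm (costs.filter (fun c => c < p)) (fun x : Int => x) false).sum_eq,
      PySem.List.length_sorted]
    have hE : (costs.filter (fun c => c = p)).sum
        = ((costs.filter (fun c => c = p)).length : Int) * p := by
      conv_lhs => rw [filter_eq_replicate costs p]
      rw [List.sum_replicate, nsmul_eq_mul]
    rw [hE]
    have harg : (t - ((costs.filter (fun c => c < p)).length : Int)
        - ((costs.filter (fun c => c = p)).length : Int)).toNat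
        = t.toNat - (costs.filter (fun c => c < p)).length - (costs.filter (fun c => c = p)).length := by
      omega
    rw [ih, harg]

-- length of costsOf = length arr - lucky count
theorem costsOf_length (arr : List Int) (k : Int) :
    ((costsOf arr k).length : Int) = (arr.length : Int) - luckyCount arr k := by
  simp only [costsOf, luckyCount, List.length_map]
  have h1 := (List.filter_append_perm (fun x => decide (PySem.Int.mod x k = 0)) arr).length_eq
  rw [List.length_append] at h1
  simp only [decide_not, List.countP_eq_length_filter]
  omega

-- ===== VERDICT (by name: the statement is the Claim_ definition above) =====
theorem minSoldiers_spec : Claim_equal_minSoldiers := by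
  unfold Claim_equal_minSoldiers Spec_minSoldiers
  intro arr k _hdom _hpre
  rcases eq_or_ne arr [] with rfl | hne
  · rfl
  · have hn : 1 ≤ (arr.length : Int) := by
      have := List.length_pos_iff.mpr hne; omega
    have hcd0 := luckyCount_nonneg arr k
    have hco := costsOf_length arr k
    set needed := PySem.Int.floordiv ((arr.length : Int) + 1) 2 with hneed
    have hneedb : 0 < needed ∧ needed ≤ (arr.length : Int) := by
      rw [hneed, PySem.Int.floordiv_eq_ediv_of_pos (by omega)]; omega
    simp only [minSoldiers, minSoldiers_alt, altLoop_spec, zero_add, List.nil_append, ← hneed]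
    rcases forA_spec k needed arr [] 0 0 hneedb.1 with ⟨hc, hres | ⟨nl', lf, hres, hlf⟩⟩ | ⟨hc, hres⟩
    · rw [hres, if_pos (by omega)]
    · rw [hres]
      show minSoldiersWhileA (needed - lf).toNat (PySem.List.sorted nl' (fun x => x) true) 0
        = if needed - luckyCount arr k ≤ 0 then 0 else sumSmallest (costsOf arr k) (needed - luckyCount arr k)
      rw [show (needed - lf).toNat = 0 by omega, if_pos (by omega)]
      rfl
    · rw [hres]
      show minSoldiersWhileA (needed - (0 + luckyCount arr k)).toNat
          (PySem.List.sorted ([] ++ costsOf arr k) (fun x => x) true) 0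
        = if needed - luckyCount arr k ≤ 0 then 0 else sumSmallest (costsOf arr k) (needed - luckyCount arr k)
      rw [zero_add, List.nil_append, if_neg (by omega), sorted_rev_eq_reverse,
        whileA_reverse (needed - luckyCount arr k).toNat (PySem.List.sorted (costsOf arr k) (fun x => x) false) 0
          (by rw [PySem.List.length_sorted]; omega),
        sumSmallest_spec]
      ring
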